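-- pv_equiv track=rewrite | github.com/enRichMyData/lamAPI | scripts/indexing.py | generate_dot_notation_options
-- ===== SOURCE A (Python) =====
-- def generate_dot_notation_options(name):
--     words = name.split()
--     num_words = len(words)
--     options = []
--
--     for i in range(num_words):
--         abbreviated_parts = []
--         for j in range(num_words - 1):
--             if j < i:
--                 abbreviated_parts.append(words[j][0] + ".")
--             else:
--                 abbreviated_parts.append(words[j])
--
--         option = " ".join(abbreviated_parts + [words[-1]])
--         options.append(option)
--
--     return options
-- ===== SOURCE B (Python) =====
-- def generate_dot_notation_options(name):
--     words = name.split()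
--     if not words:
--         return []
--     parts = words[:-1]
--     last = words[-1]
--     n = len(words)
--     options = []
--     for i in range(n):
--         options.append(" ".join(parts + [last]))
--         if i < n - 1:
--             parts[i] = parts[i][0] + "."
--     return options
-- ===== Notes on version B (the rewrite author's own statement) =====
-- stated objective: alternative
-- what changed: Replaces A's nested per-option reconstruction (an inner loop rebuilding the whole abbreviated prefix for every i) with a single pass that keeps a mutable parts list, emits the current join, and abbreviates one word in place per iteration.
import Mathlib
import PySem

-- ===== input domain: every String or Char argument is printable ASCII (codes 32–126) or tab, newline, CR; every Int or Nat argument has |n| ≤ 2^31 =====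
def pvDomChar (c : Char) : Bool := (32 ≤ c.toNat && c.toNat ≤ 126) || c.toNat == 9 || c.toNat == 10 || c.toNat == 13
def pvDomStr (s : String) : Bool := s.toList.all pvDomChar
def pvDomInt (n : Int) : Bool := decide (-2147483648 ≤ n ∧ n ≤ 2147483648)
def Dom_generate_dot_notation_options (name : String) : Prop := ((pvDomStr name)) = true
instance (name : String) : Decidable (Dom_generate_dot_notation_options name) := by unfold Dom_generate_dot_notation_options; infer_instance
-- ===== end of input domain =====

-- B replaces A's nested per-option reconstruction with a single pass that keeps a
-- mutable parts list and abbreviates one word in place per iteration (alternative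
-- decomposition; same output, return value proved equal on all inputs).

-- w[0] + "." (words from split() are never empty, so the index never raises)
def pvFirstDot (w : String) : String :=
  match PySem.Str.pyGet? w 0 with
  | some c => String.ofList [c, '.']
  | none => ""

-- ===== PORT A =====
def generate_dot_notation_options (name : String) : List String :=
  let words := PySem.Str.split₀ name
  let num_words : Int := words.length
  (PySem.List.pyRange 0 num_words 1).foldl (fun options i =>
    let abbreviated_parts :=
      (PySem.List.pyRange 0 (num_words - 1) 1).foldl (fun acc j =>
        if j < i then acc ++ [pvFirstDot (PySem.List.pyGetD words j "")]
        else acc ++ [PySem.List.pyGetD words j ""]) ([] : List String)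
    options ++ [PySem.Str.join " " (abbreviated_parts ++ [PySem.List.pyGetD words (-1) ""])]) []

-- ===== PORT B =====
def generate_dot_notation_options_alt (name : String) : List String :=
  let words := PySem.Str.split₀ name
  if words = [] then []
  else
    let parts := PySem.List.slice words none (some (-1))
    let last := PySem.List.pyGetD words (-1) ""
    let n : Int := words.length
    ((PySem.List.pyRange 0 n 1).foldl (fun (st : List String × List String) i =>
      let options := st.2 ++ [PySem.Str.join " " (st.1 ++ [last])]
      if i < n - 1 then
        (PySem.List.pySetD st.1 i (pvFirstDot (PySem.List.pyGetD st.1 i "")), options)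
      else (st.1, options)) (parts, [])).2

-- ===== PRECONDITION & SPEC =====
def Spec_generate_dot_notation_options (name : String) (out : List String) : Prop := out = generate_dot_notation_options_alt name
instance (name : String) (out : List String) : Decidable (Spec_generate_dot_notation_options name out) := by unfold Spec_generate_dot_notation_options; infer_instance

-- ===== CLAIM (what is proved, stated in full; the proofs are below) =====
def Claim_equal_generate_dot_notation_options : Prop := ∀ (name : String), Dom_generate_dot_notation_options name → Spec_generate_dot_notation_options name (generate_dot_notation_options name)

-- ===== LEMMAS AND PROOFS =====

-- the i-th option, stated over the split word list (proof-side helper)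
def pvEntry (ws : List String) (i : Nat) : String :=
  PySem.Str.join " "
    (((List.range (ws.length - 1)).map fun k =>
        if k < i then pvFirstDot (ws.getD k "") else ws.getD k "") ++
      [PySem.List.pyGetD ws (-1) ""])

lemma pv_ite_append {α : Type} (p : Int → Prop) [DecidablePred p] (f g : Int → α) (l : List Int) (acc : List α) :
    l.foldl (fun acc j => if p j then acc ++ [f j] else acc ++ [g j]) acc
      = acc ++ l.map (fun j => if p j then f j else g j) := by
  have h : (fun (acc : List α) j => if p j then acc ++ [f j] else acc ++ [g j])
      = fun acc j => acc ++ [if p j then f j else g j] := by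
    funext acc j; split_ifs <;> rfl
  rw [h, PySem.List.foldl_append_singleton_eq_map]

lemma pvA_closed (name : String) :
    generate_dot_notation_options name
      = (List.range (PySem.Str.split₀ name).length).map (pvEntry (PySem.Str.split₀ name)) := by
  unfold generate_dot_notation_options
  set ws := PySem.Str.split₀ name with hws
  simp only []
  rw [show (fun (options : List String) i =>
      options ++ [PySem.Str.join " " ((((PySem.List.pyRange 0 ((ws.length:Int) - 1) 1).foldl (fun acc j =>
        if j < i then acc ++ [pvFirstDot (PySem.List.pyGetD ws j "")]
        else acc ++ [PySem.List.pyGetD ws j ""]) ([] : List String)) : List String) ++ [PySem.List.pyGetD ws (-1) ""])])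
    = fun options i => options ++ [PySem.Str.join " "
        (((PySem.List.pyRange 0 ((ws.length:Int) - 1) 1).map (fun j =>
          if j < i then pvFirstDot (PySem.List.pyGetD ws j "") else PySem.List.pyGetD ws j "")) ++ [PySem.List.pyGetD ws (-1) ""])] from by
    funext options i
    rw [pv_ite_append (fun j => j < i)]
    simp]
  rw [PySem.List.foldl_append_singleton_eq_map]
  simp only [List.nil_append, PySem.List.pyRange_one, List.map_map, Function.comp_def,
    zero_add, PySem.List.pyGetD_natCast, Int.sub_zero]
  have hlen : ((ws.length : Int) - 1).toNat = ws.length - 1 := by omega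
  rw [hlen]
  simp [pvEntry, Nat.cast_lt]

-- abbreviating the first i entries, as a take/drop split
lemma pv_range_map_ite {α : Type} (f : α → α) (d : α) :
    ∀ (l : List α) (i : Nat),
      (List.range l.length).map (fun k => if k < i then f (l.getD k d) else l.getD k d)
        = (l.take i).map f ++ l.drop i := by
  intro l
  induction l with
  | nil => intro i; simp
  | cons a t ih =>
    intro i
    cases i with
    | zero =>
      have h0 := ih 0
      simp only [List.getD] at h0 ⊢
      simp only [Nat.not_lt_zero, List.take_zero, List.map_nil, List.nil_append,
        List.drop_zero, if_false] at h0
      simp [List.range_succ_eq_map, List.map_map, Function.comp_def, h0]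
    | succ i' =>
      simp only [List.length_cons, List.range_succ_eq_map, List.map_cons, List.map_map]
      simpa [Function.comp, Nat.succ_lt_succ_iff] using congrArg (List.cons (f a)) (ih i')

lemma pvB_loop (front : List String) (last : String) :
    ∀ (m a : Nat) (acc : List String),
      a + m = front.length + 1 →
      ((PySem.List.pyRange (a : Int) ((front.length : Int) + 1) 1).foldl
        (fun (st : List String × List String) i =>
          if i < ((front.length : Int) + 1) - 1 then
            (PySem.List.pySetD st.1 i (pvFirstDot (PySem.List.pyGetD st.1 i "")),
              st.2 ++ [PySem.Str.join " " (st.1 ++ [last])])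
          else (st.1, st.2 ++ [PySem.Str.join " " (st.1 ++ [last])]))
        ((front.take a).map pvFirstDot ++ front.drop a, acc)).2
        = acc ++ (List.range' a m).map
            (fun i => PySem.Str.join " " (((front.take i).map pvFirstDot ++ front.drop i) ++ [last])) := by
  intro m
  induction m with
  | zero =>
    intro a acc h
    rw [PySem.List.pyRange_one_eq_nil (by omega)]
    simp
  | succ m ih =>
    intro a acc h
    rw [PySem.List.pyRange_one_cons (by omega : (a:Int) < (front.length:Int) + 1)]
    simp only [List.foldl_cons]
    set p := (front.take a).map pvFirstDot ++ front.drop a with hp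
    by_cases hc : (a:Int) < ((front.length : Int) + 1) - 1
    · have ha : a < front.length := by omega
      rw [if_pos hc]
      have hplen : ((front.take a).map pvFirstDot).length = a := by
        simp [List.length_take]; omega
      have hdrop : front.drop a = front[a] :: front.drop (a+1) :=
        (List.drop_eq_getElem_cons ha)
      have hget : PySem.List.pyGetD p (a:Int) "" = front[a] := by
        rw [PySem.List.pyGetD_natCast, hp, List.getD_eq_getElem?_getD,
          List.getElem?_append_right (by omega), hplen, hdrop]
        simp [ha]
      have hset : PySem.List.pySetD p (a:Int) (pvFirstDot front[a])
          = (front.take (a+1)).map pvFirstDot ++ front.drop (a+1) := by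
      -- pySetD at an in-range nat index is List.set
        have hps : PySem.List.pySetD p (a:Int) (pvFirstDot front[a]) = p.set a (pvFirstDot front[a]) := by
          simp [PySem.List.pySetD, PySem.List.pySet?, PySem.List.pyIdx?, hp]
          rw [if_pos (by omega)]
          rfl
        rw [hps, hp, hdrop, List.set_append_right _ _ (by omega), hplen, Nat.sub_self,
          List.set_cons_zero]
        have hma : a < (List.map pvFirstDot front).length := by simpa using ha
        simp only [List.map_take]
        rw [List.take_succ_eq_append_getElem hma]
        simp
      rw [hget, hset]
      have hIH := ih (a+1) (acc ++ [PySem.Str.join " " (p ++ [last])]) (by omega)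
      push_cast at hIH ⊢
      rw [hIH, List.range'_succ]
      simp [hp]
    · have ha : a = front.length := by omega
      have hm : m = 0 := by omega
      rw [if_neg hc]
      subst ha hm
      rw [show ((front.length : Int) + 1) = (((front.length + 1 : Nat)) : Int) by push_cast; ring]
      rw [PySem.List.pyRange_one_eq_nil (by omega)]
      simp [hp]
      rw [List.take_of_length_le (by simp)]

lemma pvB_closed (name : String) :
    generate_dot_notation_options_alt name
      = (List.range (PySem.Str.split₀ name).length).map (pvEntry (PySem.Str.split₀ name)) := by
  unfold generate_dot_notation_options_alt
  set ws := PySem.Str.split₀ name with hws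
  by_cases hnil : ws = []
  · simp [hnil]
  · rw [if_neg hnil]
    simp only [PySem.List.slice_to_neg_one]
    set front := ws.dropLast with hfront
    have hlen : ws.length = front.length + 1 := by
      rw [hfront, List.length_dropLast]
      have := List.length_pos_iff.mpr hnil
      omega
    set last := PySem.List.pyGetD ws (-1) "" with hlast
    have hfun : (fun (st : List String × List String) i =>
        let options := st.2 ++ [PySem.Str.join " " (st.1 ++ [last])]
        if i < (ws.length : Int) - 1 then
          (PySem.List.pySetD st.1 i (pvFirstDot (PySem.List.pyGetD st.1 i "")), options)
        else (st.1, options))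
        = (fun (st : List String × List String) i =>
          if i < ((front.length : Int) + 1) - 1 then
            (PySem.List.pySetD st.1 i (pvFirstDot (PySem.List.pyGetD st.1 i "")),
              st.2 ++ [PySem.Str.join " " (st.1 ++ [last])])
          else (st.1, st.2 ++ [PySem.Str.join " " (st.1 ++ [last])])) := by
      funext st i
      rw [show ((ws.length : Int) - 1) = ((front.length : Int) + 1) - 1 by omega]
    rw [hfun]
    have h0 := pvB_loop front last (front.length + 1) 0 [] (by omega)
    simp only [List.take_zero, List.map_nil, List.nil_append, List.drop_zero] at h0
    rw [show ((ws.length : Int)) = ((front.length : Int) + 1) by omega,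
      show ((0:Int)) = ((0:Nat):Int) by norm_num, h0]
    rw [hlen, ← List.range_eq_range']
    apply List.map_congr_left
    intro i hi
    rw [pvEntry]
    congr 1
    rw [show ws.length - 1 = front.length by omega, ← pv_range_map_ite pvFirstDot ""]
    apply congrArg (· ++ [last])
    apply List.map_congr_left
    intro k hk
    simp only [List.mem_range] at hk
    have hkw : k < ws.length := by omega
    have hgd : front.getD k "" = ws.getD k "" := by
      rw [List.getD_eq_getElem _ _ (by omega : k < front.length), List.getD_eq_getElem _ _ hkw]
      simp [hfront]
    rw [hgd]

-- ===== VERDICT (by name: the statement is the Claim_ definition above) =====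
theorem generate_dot_notation_options_spec : Claim_equal_generate_dot_notation_options := by
  intro name _
  unfold Spec_generate_dot_notation_options
  rw [pvA_closed, pvB_closed]
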